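-- pv_equiv track=rewrite | github.com/joshmartommarcelino/TestRepository | Codelab_2_Ex_1.py | create_rectangle
-- ===== SOURCE A (Python) =====
-- def create_rectangle(size):
--     lines = []
--     for i in range(size):
--         if i == 0 or i == size - 1:
--             lines.append("*" * size)
--         else:
--             lines.append("*" + " " * (size - 2) + "*")
--     return "\n".join(lines)
-- ===== SOURCE B (Python) =====
-- def create_rectangle(size):
--     if size <= 0:
--         return ""
--     w = size + 1  # row stride: size cells plus one separator slot
--     buf = bytearray(b"*" * (size * w - 1))   # flat buffer, all stars
--     for r in range(1, size):
--         buf[r * w - 1] = 10                  # punch the newlines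
--     blank = b" " * (size - 2)
--     for r in range(1, size - 1):
--         p = r * w + 1
--         buf[p:p + size - 2] = blank          # carve out the interior
--     return buf.decode("ascii")
-- ===== Notes on version B (the rewrite author's own statement) =====
-- stated objective: alternative
-- what changed: B paints one flat character buffer instead of assembling a list of row strings: it fills the whole buffer with stars, punches a newline at each row boundary, then splices a run of spaces into each interior row; A loops over rows with a branch choosing a row shape.
import Mathlib
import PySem

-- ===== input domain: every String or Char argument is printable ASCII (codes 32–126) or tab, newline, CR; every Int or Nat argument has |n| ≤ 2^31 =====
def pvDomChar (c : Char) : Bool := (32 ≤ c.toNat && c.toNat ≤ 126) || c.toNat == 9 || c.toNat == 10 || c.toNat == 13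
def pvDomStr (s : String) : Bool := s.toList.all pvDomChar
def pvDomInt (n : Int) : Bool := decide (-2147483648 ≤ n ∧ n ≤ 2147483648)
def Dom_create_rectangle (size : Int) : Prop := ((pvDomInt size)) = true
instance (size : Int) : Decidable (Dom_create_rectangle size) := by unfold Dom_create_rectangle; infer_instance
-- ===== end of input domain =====

-- B paints one flat character buffer (all stars, punch the newline slots, splice the
-- interior spaces) instead of A's row loop with a per-row branch; objective: alternative.

-- ===== PORT A =====
def create_rectangle (size : Int) : String :=
  let lines : List String := (PySem.List.pyRange 0 size 1).foldl
    (fun lines i =>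
      if i = 0 ∨ i = size - 1 then
        lines ++ [String.ofList (PySem.List.pyRepeat ['*'] size)]
      else
        lines ++ [String.ofList (['*'] ++ PySem.List.pyRepeat [' '] (size - 2) ++ ['*'])]) []
  PySem.Str.join "\n" lines

-- ===== PORT B =====
-- bytearray of ASCII bytes → List Char; buf[k] = 10 → List.set k '\n'; the equal-length
-- slice assignment buf[p:p+size-2] = blank → take p ++ blank ++ drop (p+size-2)
-- (exact here: 0 ≤ p ≤ p+size-2 ≤ len buf on every executed iteration);
-- .decode("ascii") → String.ofList.
def create_rectangle_alt (size : Int) : String :=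
  if size ≤ 0 then ""
  else
    let w := size + 1
    let buf : List Char := List.replicate (size * w - 1).toNat '*'
    let buf := (PySem.List.pyRange 1 size 1).foldl
        (fun b r => b.set (r * w - 1).toNat '\n') buf
    let blank : List Char := List.replicate (size - 2).toNat ' '
    let buf := (PySem.List.pyRange 1 (size - 1) 1).foldl
        (fun b r =>
          let p := r * w + 1
          b.take p.toNat ++ blank ++ b.drop (p.toNat + (size - 2).toNat)) buf
    String.ofList buf

-- ===== PRECONDITION & SPEC =====
def Spec_create_rectangle (size : Int) (out : String) : Prop := out = create_rectangle_alt size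
instance (size : Int) (out : String) : Decidable (Spec_create_rectangle size out) := by unfold Spec_create_rectangle; infer_instance

-- ===== CLAIM =====
def Claim_equal_create_rectangle : Prop := ∀ (size : Int), Dom_create_rectangle size → Spec_create_rectangle size (create_rectangle size)

-- ===== LEMMAS AND PROOFS =====

-- row shapes and repeated row blocks (ending each row with its newline)
def rowS (n : Nat) : List Char := List.replicate n '*'
def rowM (n : Nat) : List Char := ['*'] ++ List.replicate (n - 2) ' ' ++ ['*']
def blockS (n m : Nat) : List Char := (List.replicate m (rowS n ++ ['\n'])).flatten
def blockM (n m : Nat) : List Char := (List.replicate m (rowM n ++ ['\n'])).flatten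

theorem rowS_length (n : Nat) : (rowS n).length = n := by simp [rowS]

theorem rowM_length (n : Nat) (h : 2 ≤ n) : (rowM n).length = n := by
  simp [rowM]; omega

theorem blockS_succ (n m : Nat) : blockS n (m+1) = blockS n m ++ (rowS n ++ ['\n']) := by
  simp [blockS, List.replicate_succ']

theorem blockS_cons (n m : Nat) : blockS n (m+1) = (rowS n ++ ['\n']) ++ blockS n m := by
  simp [blockS, List.replicate_succ]

theorem blockM_succ (n m : Nat) : blockM n (m+1) = blockM n m ++ (rowM n ++ ['\n']) := by
  simp [blockM, List.replicate_succ']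

theorem blockS_length (n m : Nat) : (blockS n m).length = m * (n+1) := by
  induction m with
  | zero => simp [blockS]
  | succ m ih => rw [blockS_succ]; simp only [List.length_append, ih]
                 simp [rowS, Nat.succ_mul]

theorem blockM_length (n m : Nat) (h : 2 ≤ n) : (blockM n m).length = m * (n+1) := by
  induction m with
  | zero => simp [blockM]
  | succ m ih => rw [blockM_succ]; simp only [List.length_append, ih, rowM_length n h]
                 simp [Nat.succ_mul]

-- setting inside a replicate splits it
theorem replicate_set (a b : Char) : ∀ (i k : Nat), i < k →
    (List.replicate k a).set i b
      = List.replicate i a ++ b :: List.replicate (k - i - 1) a := by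
  intro i
  induction i with
  | zero => intro k hk; cases k with
            | zero => omega
            | succ k => simp [List.replicate_succ]
  | succ i ih => intro k hk; cases k with
            | zero => omega
            | succ k =>
                simp only [List.replicate_succ, List.set_cons_succ, ih k (by omega)]
                simp

-- PHASE 1: punching the newline slots turns the all-star buffer into full star rows
theorem phase1 (n : Nat) (hn : 1 ≤ n) : ∀ m, m ≤ n - 1 →
    (List.range m).foldl
        (fun (b : List Char) (k : Nat) => b.set (((1 + (k : Int)) * ((n : Int) + 1) - 1)).toNat '\n')
        (List.replicate (n * (n+1) - 1) '*')
    = blockS n m ++ List.replicate (n * (n+1) - m * (n+1) - 1) '*' := by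
  intro m
  induction m with
  | zero => intro _; simp [blockS]
  | succ m ih =>
      intro hm
      rw [List.range_succ, List.foldl_append, ih (by omega)]
      simp only [List.foldl_cons, List.foldl_nil]
      have hidx : (((1 + (m : Int)) * ((n : Int) + 1) - 1)).toNat = m * (n+1) + n := by
        have : ((1 + (m : Int)) * ((n : Int) + 1) - 1) = ((m * (n+1) + n : Nat) : Int) := by
          push_cast; ring
        rw [this, Int.toNat_natCast]
      rw [hidx, List.set_append]
      have hBle : m * (n+1) ≤ (n-2) * (n+1) := Nat.mul_le_mul_right _ (by omega)
      have hA : (n-2) * (n+1) + 2 * (n+1) = n * (n+1) := by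
        rw [← Nat.add_mul]; congr 1; omega
      rw [if_neg (by rw [blockS_length]; omega), blockS_length]
      have hsub : m * (n+1) + n - m * (n+1) = n := by omega
      rw [hsub, replicate_set _ _ _ _ (by omega)]
      rw [blockS_succ]
      have hcount : n * (n+1) - m * (n+1) - 1 - n - 1 = n * (n+1) - (m+1) * (n+1) - 1 := by
        have : (m+1) * (n+1) = m * (n+1) + (n+1) := by rw [Nat.succ_mul]
        omega
      rw [hcount]
      simp [rowS, List.append_assoc]

-- the buffer after PHASE 2 has processed its first m interior rows
def afterM (n m : Nat) : List Char :=
  (rowS n ++ ['\n']) ++ blockM n m ++ blockS n (n - 2 - m) ++ rowS n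

-- PHASE 2: each splice carves one interior row from stars to star-spaces-star
theorem phase2 (n : Nat) (hn : 2 ≤ n) : ∀ m, m ≤ n - 2 →
    (List.range m).foldl
        (fun (b : List Char) (k : Nat) =>
          b.take (((1 + (k : Int)) * ((n : Int) + 1) + 1)).toNat
            ++ List.replicate (((n : Int) - 2)).toNat ' '
            ++ b.drop ((((1 + (k : Int)) * ((n : Int) + 1) + 1)).toNat + (((n : Int) - 2)).toNat))
        (afterM n 0)
    = afterM n m := by
  intro m
  induction m with
  | zero => intro _; rfl
  | succ m ih =>
      intro hm
      rw [List.range_succ, List.foldl_append, ih (by omega)]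
      simp only [List.foldl_cons, List.foldl_nil]
      have hp : (((1 + (m : Int)) * ((n : Int) + 1) + 1)).toNat = (m+1) * (n+1) + 1 := by
        have : ((1 + (m : Int)) * ((n : Int) + 1) + 1) = (((m+1) * (n+1) + 1 : Nat) : Int) := by
          push_cast; ring
        rw [this, Int.toNat_natCast]
      have hblank : (((n : Int) - 2)).toNat = n - 2 := by omega
      rw [hp, hblank]
      -- expose the structure of the current buffer around the splice point
      have hk : n - 2 - m = (n - 3 - m) + 1 := by omega
      have hdecomp : afterM n m
          = ((rowS n ++ ['\n']) ++ blockM n m ++ ['*'])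
            ++ List.replicate (n-2) '*'
            ++ (['*'] ++ ['\n'] ++ blockS n (n - 3 - m) ++ rowS n) := by
        rw [afterM, hk, blockS_cons]
        have hrowS : rowS n = ['*'] ++ List.replicate (n-2) '*' ++ ['*'] := by
          have h1 : n = 1 + (n-2) + 1 := by omega
          rw [rowS]
          conv_lhs => rw [h1]
          rw [List.replicate_add, List.replicate_add]
          simp
        nth_rewrite 2 [hrowS]
        simp [List.append_assoc]
      rw [hdecomp]
      have hlen1 : ((rowS n ++ ['\n']) ++ blockM n m ++ ['*']).length = (m+1) * (n+1) + 1 := by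
        simp [rowS_length, blockM_length n m hn, Nat.succ_mul]; ring
      have htake : (((rowS n ++ ['\n']) ++ blockM n m ++ ['*'])
            ++ List.replicate (n-2) '*'
            ++ (['*'] ++ ['\n'] ++ blockS n (n - 3 - m) ++ rowS n)).take ((m+1) * (n+1) + 1)
          = (rowS n ++ ['\n']) ++ blockM n m ++ ['*'] := by
        rw [← hlen1]
        have := List.take_length_add_append (l₁ := (rowS n ++ ['\n']) ++ blockM n m ++ ['*'])
          (l₂ := List.replicate (n-2) '*' ++ (['*'] ++ ['\n'] ++ blockS n (n - 3 - m) ++ rowS n)) 0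
        simp only [List.append_assoc] at this ⊢
        exact this
      have hlen2 : (((rowS n ++ ['\n']) ++ blockM n m ++ ['*']) ++ List.replicate (n-2) '*').length
          = (m+1) * (n+1) + 1 + (n-2) := by
        have hb := blockM_length n m hn
        have hsm : (m+1) * (n+1) = m * (n+1) + (n+1) := Nat.succ_mul m (n+1)
        simp [rowS_length, hb]
        omega
      have hdrop : (((rowS n ++ ['\n']) ++ blockM n m ++ ['*'])
            ++ List.replicate (n-2) '*'
            ++ (['*'] ++ ['\n'] ++ blockS n (n - 3 - m) ++ rowS n)).drop ((m+1) * (n+1) + 1 + (n-2))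
          = ['*'] ++ ['\n'] ++ blockS n (n - 3 - m) ++ rowS n := by
        rw [← hlen2]
        have := List.drop_length_add_append
          (l₁ := ((rowS n ++ ['\n']) ++ blockM n m ++ ['*']) ++ List.replicate (n-2) '*')
          (l₂ := ['*'] ++ ['\n'] ++ blockS n (n - 3 - m) ++ rowS n) 0
        simp only [List.append_assoc] at this ⊢
        exact this
      rw [htake, hdrop, afterM, blockM_succ]
      have : n - 2 - (m+1) = n - 3 - m := by omega
      rw [this, rowM]
      simp [List.append_assoc]

-- joining [x] ++ m copies of mid ++ [y] flattens to x, sep, (mid,sep)^m, y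
theorem join_shape (sep x y mid : List Char) : ∀ m,
    PySem.Chars.join sep (x :: (List.replicate m mid ++ [y]))
    = x ++ sep ++ (List.replicate m (mid ++ sep)).flatten ++ y := by
  intro m
  induction m generalizing x with
  | zero => simp [PySem.Chars.join_cons_cons, PySem.Chars.join_singleton]
  | succ m ih =>
      rw [List.replicate_succ, List.cons_append, PySem.Chars.join_cons_cons, ih mid]
      simp [List.replicate_succ, List.append_assoc]

-- A's line list is a map of its row function over the row range
theorem pv_foldl_append_map {α β : Type} (f : α → β) :
    ∀ (l : List α) (init : List β),
      l.foldl (fun acc i => acc ++ [f i]) init = init ++ l.map f := by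
  intro l
  induction l with
  | nil => intro init; simp
  | cons x xs ih => intro init; simp [List.foldl_cons, ih]

theorem pv_lines_eq (size : Int) (top mid : String) :
    (PySem.List.pyRange 0 size 1).foldl
      (fun lines i => if i = 0 ∨ i = size - 1 then lines ++ [top] else lines ++ [mid]) []
    = (PySem.List.pyRange 0 size 1).map
        (fun i => if i = 0 ∨ i = size - 1 then top else mid) := by
  have h : (fun (lines : List String) (i : Int) =>
      if i = 0 ∨ i = size - 1 then lines ++ [top] else lines ++ [mid])
      = fun lines i => lines ++ [if i = 0 ∨ i = size - 1 then top else mid] := by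
    funext lines i; split_ifs <;> rfl
  rw [h, pv_foldl_append_map]
  simp

theorem pv_map_lines (size : Int) (h2 : 2 ≤ size) (top mid : String) :
    (PySem.List.pyRange 0 size 1).map
        (fun i => if i = 0 ∨ i = size - 1 then top else mid)
    = [top] ++ List.replicate (size - 2).toNat mid ++ [top] := by
  rw [PySem.List.pyRange_one_append 0 1 size (by omega) (by omega),
      PySem.List.pyRange_one_append 1 (size - 1) size (by omega) (by omega)]
  have hfirst : PySem.List.pyRange 0 1 1 = [0] := by
    simpa using PySem.List.pyRange_one_singleton 0
  rw [hfirst]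
  have hlast : PySem.List.pyRange (size - 1) size 1 = [size - 1] := by
    have := PySem.List.pyRange_one_singleton (size - 1)
    simpa [show size - 1 + 1 = size by omega] using this
  rw [hlast]
  simp only [List.map_append, List.map_cons, List.map_nil]
  simp only [true_or, or_true, if_true]
  have hmid : (PySem.List.pyRange 1 (size - 1) 1).map
      (fun i => if i = 0 ∨ i = size - 1 then top else mid)
      = List.replicate (size - 2).toNat mid := by
    apply List.eq_replicate_iff.mpr
    constructor
    · rw [List.length_map, PySem.List.length_pyRange_one]; omega
    · intro b hb
      rcases List.mem_map.mp hb with ⟨i, hi, hbi⟩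
      rw [PySem.List.mem_pyRange_one] at hi
      rw [if_neg (by omega)] at hbi
      exact hbi.symm
  rw [hmid, List.append_assoc]

-- B's final buffer, for size ≥ 1, in row form
theorem pv_alt_char (size : Int) (h2s : 2 ≤ size) :
    create_rectangle_alt size
    = String.ofList (afterM size.toNat (size.toNat - 2)) := by
  unfold create_rectangle_alt
  rw [if_neg (by omega)]
  dsimp only
  set n : Nat := size.toNat with hn
  have hsize : (size : Int) = (n : Int) := by
    rw [hn]; exact (Int.toNat_of_nonneg (by omega)).symm
  have hn2 : 2 ≤ n := by omega
  congr 1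
  -- phase 1 rewrite: range and fold in Nat form
  have hrange1 : PySem.List.pyRange 1 size 1
      = (List.range (n-1)).map (fun (k : Nat) => 1 + (k : Int)) := by
    rw [PySem.List.pyRange_one, show (size - 1).toNat = n - 1 by rw [hn]; omega]
  have hinit : (size * (size + 1) - 1).toNat = n * (n+1) - 1 := by
    have h : size * (size + 1) = ((n * (n+1) : Nat) : Int) := by
      rw [hsize]; push_cast; ring
    omega
  have h1' : (List.range (n-1)).foldl
        (fun (b : List Char) (k : Nat) => b.set (((1 + (k : Int)) * ((n : Int) + 1) - 1)).toNat '\n')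
        (List.replicate (n * (n+1) - 1) '*')
      = blockS n (n-1) ++ List.replicate (n * (n+1) - (n-1) * (n+1) - 1) '*' :=
    phase1 n (by omega) (n-1) (le_refl _)
  have hcount : n * (n+1) - (n-1) * (n+1) - 1 = n := by
    have : (n-1) * (n+1) + (n+1) = n * (n+1) := by
      rw [← Nat.succ_mul]; congr 1; omega
    omega
  rw [hrange1, List.foldl_map, hinit]
  have hbuf1 : (List.range (n-1)).foldl
        (fun (b : List Char) (k : Nat) => b.set ((1 + (k:Int)) * (size + 1) - 1).toNat '\n')
        (List.replicate (n * (n+1) - 1) '*')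
      = blockS n (n-1) ++ rowS n := by
    rw [show ((fun (b : List Char) (k : Nat) => b.set ((1 + (k:Int)) * (size + 1) - 1).toNat '\n'))
        = fun (b : List Char) (k : Nat) => b.set (((1 + (k : Int)) * ((n : Int) + 1) - 1)).toNat '\n' by
      funext b k; rw [hsize]]
    rw [h1', hcount, rowS]
  rw [hbuf1]
  -- phase 2
  have hstart : blockS n (n-1) ++ rowS n = afterM n 0 := by
    have h : n - 1 = (n - 2) + 1 := by omega
    rw [afterM, h, blockS_cons]
    simp [blockM, List.append_assoc]
  have hrange2 : PySem.List.pyRange 1 (size - 1) 1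
      = (List.range (n-2)).map (fun (k : Nat) => 1 + (k : Int)) := by
    rw [PySem.List.pyRange_one, show (size - 1 - 1).toNat = n - 2 by rw [hn]; omega]
  rw [hrange2, List.foldl_map, hstart]
  have hfun : (fun (b : List Char) (k : Nat) =>
        b.take ((1 + (k:Int)) * (size + 1) + 1).toNat
          ++ List.replicate (size - 2).toNat ' '
          ++ b.drop (((1 + (k:Int)) * (size + 1) + 1).toNat + (size - 2).toNat))
      = fun (b : List Char) (k : Nat) =>
          b.take (((1 + (k : Int)) * ((n : Int) + 1) + 1)).toNat
            ++ List.replicate (((n : Int) - 2)).toNat ' '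
            ++ b.drop ((((1 + (k : Int)) * ((n : Int) + 1) + 1)).toNat + (((n : Int) - 2)).toNat) := by
    funext b k; rw [hsize]
  rw [hfun]
  exact phase2 n (by omega) (n-2) (le_refl _)

theorem pv_eq (size : Int) : create_rectangle size = create_rectangle_alt size := by
  by_cases h0 : size ≤ 0
  · unfold create_rectangle create_rectangle_alt
    rw [if_pos h0, PySem.List.pyRange_one_eq_nil h0]
    simp [PySem.Str.join]
  · by_cases h1 : size = 1
    · subst h1
      decide
    · have h2 : 2 ≤ size := by omega
      rw [pv_alt_char size h2]
      set n : Nat := size.toNat with hn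
      unfold create_rectangle
      apply String.toList_inj.mp
      rw [String.toList_ofList]
      rw [pv_lines_eq, pv_map_lines size h2]
      rw [show ([String.ofList (PySem.List.pyRepeat ['*'] size)]
            ++ List.replicate (size - 2).toNat
                (String.ofList (['*'] ++ PySem.List.pyRepeat [' '] (size - 2) ++ ['*']))
            ++ [String.ofList (PySem.List.pyRepeat ['*'] size)])
          = String.ofList (PySem.List.pyRepeat ['*'] size)
              :: (List.replicate (size - 2).toNat
                  (String.ofList (['*'] ++ PySem.List.pyRepeat [' '] (size - 2) ++ ['*']))
                ++ [String.ofList (PySem.List.pyRepeat ['*'] size)]) from by simp]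
      rw [PySem.Str.toList_join]
      simp only [List.map_cons, List.map_append, List.map_replicate, List.map_nil,
        String.toList_ofList]
      rw [join_shape]
      have hrep : PySem.List.pyRepeat ['*'] size = rowS n := by
        rw [PySem.List.pyRepeat_singleton, rowS]
      have hmid : ['*'] ++ PySem.List.pyRepeat [' '] (size - 2) ++ ['*'] = rowM n := by
        rw [PySem.List.pyRepeat_singleton, rowM,
            show (size - 2).toNat = n - 2 from by rw [hn]; omega]
      have hm : (size - 2).toNat = n - 2 := by rw [hn]; omega
      rw [hrep, hmid, hm, afterM]
      have hz : blockS n (n - 2 - (n-2)) = [] := by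
        simp [blockS]
      rw [hz]
      have hsep : ("\n" : String).toList = ['\n'] := rfl
      rw [hsep, blockM]
      simp [List.append_assoc]

-- ===== VERDICT =====
theorem create_rectangle_spec : Claim_equal_create_rectangle := by
  intro size _
  unfold Spec_create_rectangle
  exact pv_eq size
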